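-- pv_equiv track=rewrite | github.com/zjy1298/homework | qr.py | CCindicator
-- ===== SOURCE A (Python) =====
-- def CCindicator(s):
--     x = len(s)
--     s = ""
--     for i in range(9):
--         s += str(x & 1)
--         x >>= 1
--     s = s[::-1]
--     return s
-- ===== SOURCE B (Python) =====
-- def CCindicator(s):
--     return format(len(s) & 0x1FF, '09b')
-- ===== Notes on version B (the rewrite author's own statement) =====
-- stated objective: idiomatic
-- what changed: Replaces the 9-iteration LSB-first bit extraction loop plus string reversal with a closed-form mask (len(s) & 0x1FF) and a single zero-padded binary format call.
import Mathlib
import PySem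

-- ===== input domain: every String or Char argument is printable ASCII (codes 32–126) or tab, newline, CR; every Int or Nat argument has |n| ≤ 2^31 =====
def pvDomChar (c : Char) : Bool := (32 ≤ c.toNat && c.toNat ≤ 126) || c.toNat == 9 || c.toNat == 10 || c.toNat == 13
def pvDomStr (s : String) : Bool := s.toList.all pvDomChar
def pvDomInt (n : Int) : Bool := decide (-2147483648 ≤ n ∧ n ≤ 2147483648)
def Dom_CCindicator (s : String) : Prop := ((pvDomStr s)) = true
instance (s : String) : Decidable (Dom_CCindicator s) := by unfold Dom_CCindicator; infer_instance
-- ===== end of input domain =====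

-- B replaces A's 9-step LSB-first bit loop + reversal by a mask and a direct zero-padded
-- binary rendering (idiomatic; same result).

-- ===== PORT A =====
-- For i in range(9): append str(x & 1), shift x right; then reverse (s[::-1] = reverse).
-- len(s) is a nonnegative int, so x is tracked as a Nat: x & 1 = x % 2, x >> 1 = x / 2 (exact).
def CCindicator (s : String) : String :=
  let x := s.toList.length
  let r := (List.range 9).foldl
    (fun (st : String × Nat) _ => (st.1 ++ toString (st.2 % 2), st.2 / 2)) ("", x)
  String.ofList r.1.toList.reverse

-- ===== PORT B =====
-- Hand port of format(n, '09b'): MSB-first 9-character binary string of n = len(s) & 0x1FF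
-- (& 0x1FF on a nonnegative int = % 512; exact).
def pvBinW : Nat → Nat → List Char
  | 0, _ => []
  | k + 1, n => pvBinW k (n / 2) ++ [if n % 2 = 1 then '1' else '0']

def CCindicator_alt (s : String) : String :=
  String.ofList (pvBinW 9 (s.toList.length % 512))

-- ===== PRECONDITION & SPEC =====
def Spec_CCindicator (s : String) (out : String) : Prop := out = CCindicator_alt s
instance (s : String) (out : String) : Decidable (Spec_CCindicator s out) := by unfold Spec_CCindicator; infer_instance

-- ===== CLAIM (what is proved, stated in full; the proofs are below) =====
def Claim_equal_CCindicator : Prop := ∀ (s : String), Dom_CCindicator s → Spec_CCindicator s (CCindicator s)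

-- ===== LEMMAS AND PROOFS =====

-- LSB-first bit list, matching what A's loop appends.
def pvLsb : Nat → Nat → List Char
  | 0, _ => []
  | k + 1, n => (if n % 2 = 1 then '1' else '0') :: pvLsb k (n / 2)

theorem pvToString_mod_two (n : Nat) : toString (n % 2) = String.ofList [if n % 2 = 1 then '1' else '0'] := by
  have h : n % 2 = 0 ∨ n % 2 = 1 := by omega
  rcases h with h | h <;> rw [h] <;> rfl

theorem pvLoop_eq (k : Nat) : ∀ (x : Nat) (acc : String),
    ((List.range k).foldl
      (fun (st : String × Nat) _ => (st.1 ++ toString (st.2 % 2), st.2 / 2)) (acc, x)).1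
      = acc ++ String.ofList (pvLsb k x) := by
  induction k with
  | zero =>
    intro x acc
    simp [pvLsb]
  | succ k ih =>
    intro x acc
    rw [List.range_succ_eq_map]
    simp only [List.foldl_cons, List.foldl_map]
    have : ((List.range k).foldl
        (fun (st : String × Nat) _ => (st.1 ++ toString (st.2 % 2), st.2 / 2))
        (acc ++ toString (x % 2), x / 2)).1
        = (acc ++ toString (x % 2)) ++ String.ofList (pvLsb k (x / 2)) := ih (x / 2) _
    rw [this, pvToString_mod_two, pvLsb, String.append_assoc]
    congr 1
    apply String.ext
    simp

theorem pvLsb_reverse (k : Nat) : ∀ x : Nat, (pvLsb k x).reverse = pvBinW k x := by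
  induction k with
  | zero => intro x; rfl
  | succ k ih => intro x; simp [pvLsb, pvBinW, ih]

theorem pvBinW_mod (k : Nat) : ∀ x : Nat, pvBinW k (x % 2 ^ k) = pvBinW k x := by
  induction k with
  | zero => intro x; rfl
  | succ k ih =>
    intro x
    have h2 : x % 2 ^ (k + 1) % 2 = x % 2 := by
      rw [Nat.mod_mod_of_dvd _ (dvd_pow_self 2 (Nat.succ_ne_zero k))]
    have hd : x % 2 ^ (k + 1) / 2 = x / 2 % 2 ^ k := by
      rw [pow_succ, mul_comm, Nat.mod_mul_right_div_self]
    rw [pvBinW, h2, hd, ih, pvBinW]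

-- ===== VERDICT (by name: the statement is the Claim_ definition above) =====
theorem CCindicator_spec : Claim_equal_CCindicator := by
  intro s _
  show CCindicator s = CCindicator_alt s
  unfold CCindicator CCindicator_alt
  simp only []
  rw [pvLoop_eq 9 s.toList.length ""]
  have h1 : ("" ++ String.ofList (pvLsb 9 s.toList.length)).toList = pvLsb 9 s.toList.length := by
    simp
  rw [h1, pvLsb_reverse, show (512 : Nat) = 2 ^ 9 from rfl, pvBinW_mod]
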